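-- pv_equiv track=rewrite | github.com/minsuh99/Diffoot | utils/data_utils.py | get_related_features
-- ===== SOURCE A (Python) =====
-- def get_related_features(columns, all_cols):
--         related = set()
--         for col in columns:
--             if col.endswith("_x") or col.endswith("_y"):
--                 prefix = col.rsplit("_", 1)[0]  # 예: Home_3
--                 for suffix in ["_x", "_y", "_vx", "_vy", "_dist"]:
--                     extended_col = f"{prefix}{suffix}"
--                     if extended_col in all_cols:
--                         related.add(extended_col)
--         return related
-- ===== SOURCE B (Python) =====
-- _SUFFIXES = ("_x", "_y", "_vx", "_vy", "_dist")
--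
--
-- def _found(ordered, name):
--     # membership in the sorted list `ordered` by binary search
--     lo, hi = 0, len(ordered)
--     while lo < hi:
--         mid = (lo + hi) // 2
--         if ordered[mid] < name:
--             lo = mid + 1
--         else:
--             hi = mid
--     return lo < len(ordered) and ordered[lo] == name
--
--
-- def get_related_features(columns, all_cols):
--     ordered = sorted(all_cols)
--     result = set()
--     for col in columns:
--         if col.endswith(("_x", "_y")):
--             stem = col[:-2]
--             for suffix in _SUFFIXES:
--                 name = stem + suffix
--                 if _found(ordered, name):
--                     result.add(name)
--     return result
-- ===== Notes on version B (the rewrite author's own statement) =====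
-- stated objective: alternative
-- what changed: B sorts all_cols once and decides each candidate's presence by a hand-written binary search on the sorted list (plus slicing the stem instead of rsplit), replacing A's linear scan of all_cols for every one of the five candidates of every qualifying column.
import Mathlib
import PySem

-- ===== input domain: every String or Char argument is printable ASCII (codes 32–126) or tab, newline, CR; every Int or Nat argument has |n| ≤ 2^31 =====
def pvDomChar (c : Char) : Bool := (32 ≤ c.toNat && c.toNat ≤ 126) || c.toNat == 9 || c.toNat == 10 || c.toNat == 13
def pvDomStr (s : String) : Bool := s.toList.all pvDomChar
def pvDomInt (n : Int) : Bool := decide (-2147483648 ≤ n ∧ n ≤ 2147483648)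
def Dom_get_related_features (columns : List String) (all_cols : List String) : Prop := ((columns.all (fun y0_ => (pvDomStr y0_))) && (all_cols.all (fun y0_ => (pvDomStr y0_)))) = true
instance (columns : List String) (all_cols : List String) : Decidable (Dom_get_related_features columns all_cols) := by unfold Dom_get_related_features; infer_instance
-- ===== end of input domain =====

-- B sorts all_cols once and decides each candidate's presence by a hand-written binary
-- search on the sorted list, instead of A's linear membership scan per candidate.

-- ===== PORT A =====
-- the literal list ["_x", "_y", "_vx", "_vy", "_dist"]
def pvSuffixes : List String := ["_x", "_y", "_vx", "_vy", "_dist"]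

-- hand port of col.rsplit("_", 1)[0]: drop everything from the LAST "_" on; col itself if no "_".
-- Exact for the one-character separator "_": scans the reversed character list for the first '_'.
def pvRsplitHeadRev : List Char → Option (List Char)
  | [] => none
  | c :: rest => if c = '_' then some rest else pvRsplitHeadRev rest

def pvRsplitHead (s : String) : String :=
  match pvRsplitHeadRev s.toList.reverse with
  | some revPfx => String.ofList revPfx.reverse
  | none => s

def get_related_features (columns : List String) (all_cols : List String) : List String :=
  columns.foldl (fun related col =>
    if PySem.Str.endswith col "_x" || PySem.Str.endswith col "_y" then
      let pfx := pvRsplitHead col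
      pvSuffixes.foldl (fun related suffix =>
        -- f"{prefix}{suffix}": string concatenation, exact as character-list append
        let extended := String.ofList (pfx.toList ++ suffix.toList)
        if all_cols.contains extended then PySem.Set.add related extended else related) related
    else related) PySem.Set.empty

-- ===== PORT B =====
-- the while-loop of _found: lo/hi bisection, recursion on hi - lo
def pvBsearchLoop (ordered : List String) (name : String) (lo hi : Nat) : Nat :=
  if h : lo < hi then
    if ordered.getD ((lo + hi) / 2) "" < name then
      pvBsearchLoop ordered name ((lo + hi) / 2 + 1) hi
    else
      pvBsearchLoop ordered name lo ((lo + hi) / 2)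
  else lo
termination_by hi - lo
decreasing_by all_goals omega

-- _found(ordered, name): the final membership test after the loop
def pvBsearch (ordered : List String) (name : String) : Bool :=
  let lo := pvBsearchLoop ordered name 0 ordered.length
  decide (lo < ordered.length) && (ordered.getD lo "" == name)

def get_related_features_alt (columns : List String) (all_cols : List String) : List String :=
  let ordered := PySem.List.sorted all_cols (fun x => x) false
  columns.foldl (fun result col =>
    -- col.endswith(("_x", "_y")): true if either suffix matches
    if PySem.Str.endswith col "_x" || PySem.Str.endswith col "_y" then
      let stem := PySem.Str.slice col none (some (-2))
      pvSuffixes.foldl (fun result suffix =>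
        let name := String.ofList (stem.toList ++ suffix.toList)
        if pvBsearch ordered name then PySem.Set.add result name else result) result
    else result) PySem.Set.empty

-- ===== PRECONDITION & SPEC =====
def Spec_get_related_features (columns : List String) (all_cols : List String) (out : List String) : Prop := out = get_related_features_alt columns all_cols
instance (columns : List String) (all_cols : List String) (out : List String) : Decidable (Spec_get_related_features columns all_cols out) := by unfold Spec_get_related_features; infer_instance

-- ===== CLAIM (what is proved, stated in full; the proofs are below) =====
def Claim_equal_get_related_features : Prop := ∀ (columns : List String) (all_cols : List String), Dom_get_related_features columns all_cols → Spec_get_related_features columns all_cols (get_related_features columns all_cols)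

-- ===== LEMMAS AND PROOFS =====

-- endswith as a character-list suffix
theorem pv_endswith_iff (s t : String) :
    PySem.Str.endswith s t = true ↔ t.toList <:+ s.toList := by
  rw [PySem.Str.endswith_eq]; exact PySem.Chars.endswith_iff _ _

-- col[:-2] strips a two-character tail
theorem pv_slice2 (col : String) (cs : List Char) (c1 c2 : Char) (h : col.toList = cs ++ [c1, c2]) :
    (PySem.Str.slice col none (some (-2))).toList = cs := by
  have h2 : (-2 : Int) = -((2 : Nat) : Int) := by norm_num
  simp only [PySem.Str.toList_slice, PySem.Chars.slice_eq_listSlice, h, h2,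
    PySem.List.slice_to_neg_natCast _ _ (by norm_num : (0:Nat) < 2)]
  simp

-- on a qualifying column both prefix computations agree
theorem pv_prefix_eq (col : String) (cs : List Char) (c : Char) (hc : c ≠ '_')
    (h : col.toList = cs ++ ['_', c]) :
    pvRsplitHead col = String.ofList cs ∧ PySem.Str.slice col none (some (-2)) = String.ofList cs := by
  constructor
  · unfold pvRsplitHead
    rw [h]
    simp [pvRsplitHeadRev, hc]
  · exact String.toList_injective (by simp [pv_slice2 col cs '_' c h])

-- sorted (≤-pairwise) lists have monotone getD inside the length
theorem pv_getD_mono (arr : List String) (hs : arr.Pairwise (· ≤ ·)) (i j : Nat)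
    (hij : i ≤ j) (hj : j < arr.length) : arr.getD i "" ≤ arr.getD j "" := by
  have hi : i < arr.length := lt_of_le_of_lt hij hj
  rw [List.getD_eq_getElem arr "" hi, List.getD_eq_getElem arr "" hj]
  rcases lt_or_eq_of_le hij with h | h
  · exact List.pairwise_iff_getElem.mp hs i j hi hj h
  · subst h; exact le_refl _

-- invariants of the bisection loop: everything below the result is < name,
-- everything from the result on (inside the list) is ≥ name
theorem pv_loop_spec (arr : List String) (x : String) (hs : arr.Pairwise (· ≤ ·)) :
    ∀ (n lo hi : Nat), hi - lo = n → lo ≤ hi → hi ≤ arr.length →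
      (∀ i, i < lo → arr.getD i "" < x) →
      (∀ i, hi ≤ i → i < arr.length → ¬ arr.getD i "" < x) →
      pvBsearchLoop arr x lo hi ≤ arr.length ∧
      (∀ i, i < pvBsearchLoop arr x lo hi → arr.getD i "" < x) ∧
      (∀ i, pvBsearchLoop arr x lo hi ≤ i → i < arr.length → ¬ arr.getD i "" < x) := by
  intro n
  induction n using Nat.strong_induction_on with
  | _ n ih =>
    intro lo hi hn hlo hhi hb ha
    rw [pvBsearchLoop]
    by_cases h : lo < hi
    · rw [dif_pos h]
      by_cases hm : arr.getD ((lo + hi) / 2) "" < x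
      · rw [if_pos hm]
        refine ih (hi - ((lo + hi) / 2 + 1)) (by omega) _ _ rfl (by omega) hhi ?_ ha
        intro i hi2
        exact lt_of_le_of_lt (pv_getD_mono arr hs i ((lo + hi) / 2) (by omega) (by omega)) hm
      · rw [if_neg hm]
        refine ih (((lo + hi) / 2) - lo) (by omega) _ _ rfl (by omega) (by omega) hb ?_
        intro i hge hlt
        by_cases hih : hi ≤ i
        · exact ha i hih hlt
        · intro hcon
          exact hm (lt_of_le_of_lt (pv_getD_mono arr hs ((lo + hi) / 2) i hge hlt) hcon)
    · rw [dif_neg h]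
      have : lo = hi := by omega
      subst this
      exact ⟨hhi, hb, ha⟩

-- on a sorted list, the binary search decides membership
theorem pv_bsearch_eq_contains (arr : List String) (x : String) (hs : arr.Pairwise (· ≤ ·)) :
    pvBsearch arr x = arr.contains x := by
  obtain ⟨hr1, hr2, hr3⟩ := pv_loop_spec arr x hs (arr.length - 0) 0 arr.length rfl
    (Nat.zero_le _) (le_refl _) (by omega) (by omega)
  set r := pvBsearchLoop arr x 0 arr.length with hrdef
  rw [Bool.eq_iff_iff]
  unfold pvBsearch
  rw [← hrdef]
  simp only [Bool.and_eq_true, decide_eq_true_eq, beq_iff_eq, List.contains_iff_mem]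
  constructor
  · rintro ⟨hlt, heq⟩
    rw [List.getD_eq_getElem arr "" hlt] at heq
    exact heq ▸ List.getElem_mem hlt
  · intro hmem
    obtain ⟨j, hj, hje⟩ := List.mem_iff_getElem.mp hmem
    have hjD : arr.getD j "" = x := by rw [List.getD_eq_getElem arr "" hj]; exact hje
    have hrj : r ≤ j := by
      by_contra hcon
      exact absurd (hjD ▸ hr2 j (by omega)) (lt_irrefl x)
    have hrlen : r < arr.length := lt_of_le_of_lt hrj hj
    refine ⟨hrlen, le_antisymm ?_ ?_⟩
    · exact hjD ▸ pv_getD_mono arr hs r j hrj hj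
    · exact not_lt.mp (hr3 r (le_refl r) hrlen)
  
-- B's binary search on sorted(all_cols) agrees with A's membership test
theorem pv_search_eq (all_cols : List String) (name : String) :
    pvBsearch (PySem.List.sorted all_cols (fun x => x) false) name = all_cols.contains name := by
  have hs : (PySem.List.sorted all_cols (fun x => x) false).Pairwise (· ≤ ·) :=
    PySem.List.sorted_pairwise all_cols (fun x => x)
  rw [pv_bsearch_eq_contains _ _ hs, Bool.eq_iff_iff]
  simp only [List.contains_iff_mem, PySem.List.mem_sorted]

-- foldl respects pointwise equal step functions
theorem pv_foldl_ext {α β : Type} (f g : α → β → α) (h : ∀ a b, f a b = g a b) (init : α) (l : List β) :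
    l.foldl f init = l.foldl g init := by
  induction l generalizing init with
  | nil => rfl
  | cons x xs ih => simp only [List.foldl_cons, h, ih]

-- the two per-column step functions are pointwise equal
theorem pv_step_eq (all_cols : List String) (rel : List String) (col : String) :
    (if PySem.Str.endswith col "_x" || PySem.Str.endswith col "_y" then
      let pfx := pvRsplitHead col
      pvSuffixes.foldl (fun related suffix =>
        let extended := String.ofList (pfx.toList ++ suffix.toList)
        if all_cols.contains extended then PySem.Set.add related extended else related) rel
    else rel) =
    (if PySem.Str.endswith col "_x" || PySem.Str.endswith col "_y" then
      let stem := PySem.Str.slice col none (some (-2))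
      pvSuffixes.foldl (fun result suffix =>
        let name := String.ofList (stem.toList ++ suffix.toList)
        if pvBsearch (PySem.List.sorted all_cols (fun x => x) false) name then
          PySem.Set.add result name
        else result) rel
    else rel) := by
  by_cases hq : (PySem.Str.endswith col "_x" || PySem.Str.endswith col "_y") = true
  · rw [if_pos hq, if_pos hq]
    have hdec : ∃ cs c, c ≠ '_' ∧ col.toList = cs ++ ['_', c] := by
      rcases Bool.or_eq_true_iff.mp hq with h | h
      · obtain ⟨a, ha⟩ := (pv_endswith_iff col "_x").mp h
        exact ⟨a, 'x', by decide, ha.symm⟩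
      · obtain ⟨a, ha⟩ := (pv_endswith_iff col "_y").mp h
        exact ⟨a, 'y', by decide, ha.symm⟩
    obtain ⟨cs, c, hc, h⟩ := hdec
    obtain ⟨h1, h2⟩ := pv_prefix_eq col cs c hc h
    rw [h1, h2]
    refine pv_foldl_ext _ _ ?_ rel pvSuffixes
    intro acc s
    simp only [pv_search_eq]
  · rw [if_neg hq, if_neg hq]

-- ===== VERDICT (by name: the statement is the Claim_ definition above) =====
theorem get_related_features_spec : Claim_equal_get_related_features := by
  intro columns all_cols _
  unfold Spec_get_related_features get_related_features get_related_features_alt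
  exact pv_foldl_ext _ _ (fun rel col => pv_step_eq all_cols rel col) _ _
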